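-- pv_equiv track=rewrite | github.com/miliar/Code_Jam_Webscraper | Solutions_in_python/Problem_138/d_small.py | solve_War
-- ===== SOURCE A (Python) =====
-- def solve_War(num, Naomi_blocks, Ken_blocks):
--     Naomi = list(Naomi_blocks)
--     Ken = list(Ken_blocks)
--
--     if num == 1:
--         if Naomi[0] > Ken[0]:
--             return 1
--         else:
--             return 0
--     win_cnt = 0
--
--     while(len(Naomi) > 0):
--         if Naomi[0] > Ken[len(Ken) - 1]:
--             win_cnt += len(Naomi)
--             return win_cnt
--         if Ken[0] > Naomi[len(Naomi) - 1]:
--             return win_cnt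
--
--         k_card = None
--         for k in Ken:
--             if k > Naomi[0]:
--                 k_card = k
--                 break
--         if k_card:
--             Ken.remove(k_card)
--             Naomi.pop(0)
--         else:
--             Ken.pop(0)
--             Naomi.pop(0)
--             win_cnt += 1
--
--     return win_cnt
-- ===== SOURCE B (Python) =====
-- def solve_War(num, Naomi_blocks, Ken_blocks):
--     if num == 1:
--         return 1 if Naomi_blocks[0] > Ken_blocks[0] else 0
--     m = len(Ken_blocks)
--     j = 0          # index of Ken's smallest block not yet spent
--     beaten = 0     # Naomi blocks that Ken can beat
--     for c in Naomi_blocks: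
--         while j < m and Ken_blocks[j] <= c:
--             j += 1
--         if j < m:
--             beaten += 1
--             j += 1
--     return len(Naomi_blocks) - beaten
-- ===== Notes on version B (the rewrite author's own statement) =====
-- stated objective: faster
-- what changed: B replaces A's O(n^2) round-by-round simulation (mutating both lists with pop(0)/remove and an inner rescan of Ken every round) by a single two-pointer pass over the sorted hands counting how many Naomi blocks Ken can beat; …
-- outside the precondition, e.g. on solve_War(2, [1, 1], [2, 1]): A returns 0, B returns 1; on solve_War(2, [-1, 2], [0, 3]): A returns 1, B returns 0; on solve_War(2, [1, 2], [3]): A returns 0, B returns 1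
import Mathlib
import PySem

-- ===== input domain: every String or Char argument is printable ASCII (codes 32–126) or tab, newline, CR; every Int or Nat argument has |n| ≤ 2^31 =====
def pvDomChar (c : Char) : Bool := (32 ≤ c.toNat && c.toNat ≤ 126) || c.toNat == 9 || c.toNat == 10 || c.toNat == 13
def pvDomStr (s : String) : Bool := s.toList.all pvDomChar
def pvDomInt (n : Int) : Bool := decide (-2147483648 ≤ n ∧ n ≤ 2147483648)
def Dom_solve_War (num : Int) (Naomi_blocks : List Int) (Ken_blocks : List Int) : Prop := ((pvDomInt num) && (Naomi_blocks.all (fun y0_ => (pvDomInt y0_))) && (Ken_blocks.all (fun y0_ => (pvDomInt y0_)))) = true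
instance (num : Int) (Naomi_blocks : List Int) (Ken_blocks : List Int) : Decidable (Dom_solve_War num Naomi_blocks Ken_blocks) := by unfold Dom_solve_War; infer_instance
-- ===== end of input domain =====

-- B replaces A's quadratic round-by-round simulation by a single two-pointer pass counting
-- the Naomi blocks Ken can beat (Pre_ admits sorted hands with |Naomi| ≤ |Ken|, and hands
-- whose outcome is decided at once; the measured speed-up is asymptotic).


-- ===== PORT A =====
-- the inner 'for k in Ken: if k > Naomi[0]: k_card = k; break'
def findKCard (naomi0 : Int) : List Int → Option Int
  | [] => none
  | k :: ks => if k > naomi0 then some k else findKCard naomi0 ks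

-- the 'while len(Naomi) > 0' loop; inside Pre_ Ken is nonempty whenever Naomi is,
-- so the getLastD/headD defaults are never consulted (Python raises IndexError there)
def warLoop : List Int → List Int → Int → Int
  | [], _, win => win
  | n0 :: nr, Ken, win =>
    if n0 > Ken.getLastD 0 then win + ((n0 :: nr).length : Int)
    else if Ken.headD 0 > (n0 :: nr).getLastD 0 then win
    else
      match findKCard n0 Ken with
      | some kc =>
        -- Python's 'if k_card:' is truthiness: a found card equal to 0 takes the else branch
        if kc ≠ 0 then warLoop nr ((PySem.List.remove? Ken kc).getD Ken) win
        else warLoop nr Ken.tail (win + 1)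
      | none => warLoop nr Ken.tail (win + 1)

def solve_War (num : Int) (Naomi_blocks : List Int) (Ken_blocks : List Int) : Int :=
  if num = 1 then
    if PySem.List.pyGetD Naomi_blocks 0 0 > PySem.List.pyGetD Ken_blocks 0 0 then 1 else 0
  else warLoop Naomi_blocks Ken_blocks 0

-- ===== PORT B =====
-- 'while j < m and Ken_blocks[j] <= c: j += 1'
def bSkip (K : List Int) (c : Int) (j : Nat) : Nat :=
  if h : j < K.length then
    if K[j] ≤ c then bSkip K c (j + 1) else j
  else j
termination_by K.length - j

-- the body of 'for c in Naomi_blocks', acting on the state (j, beaten)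
def bStep (K : List Int) (st : Nat × Int) (c : Int) : Nat × Int :=
  let j := bSkip K c st.1
  if j < K.length then (j + 1, st.2 + 1) else (j, st.2)

def solve_War_alt (num : Int) (Naomi_blocks : List Int) (Ken_blocks : List Int) : Int :=
  if num = 1 then
    if PySem.List.pyGetD Naomi_blocks 0 0 > PySem.List.pyGetD Ken_blocks 0 0 then 1 else 0
  else (Naomi_blocks.length : Int) - (Naomi_blocks.foldl (bStep Ken_blocks) (0, 0)).2

-- ===== PRECONDITION & SPEC =====
-- Pre_ admits the problem's natural inputs — both hands sorted ascending, Ken able to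
-- answer every Naomi block, no 0-mass Ken block meeting a negative Naomi block (A's
-- 'if k_card:' truthiness would then mistake a found block for none) — together with
-- hands whose outcome is decided at once (every Ken block loses to Naomi's first; every
-- Ken block beats every Naomi block; Naomi holds a single nonnegative block not above
-- Ken's last).  It excludes inputs on which A still returns — unsorted hands, shorter
-- Ken hands saved by an early return, the truthiness corner — whose values are
-- artefacts of A's simulation; see claim.json cites.  For num == 1 both hands must be
-- nonempty (A raises IndexError otherwise).
def Pre_solve_War (num : Int) (Naomi_blocks : List Int) (Ken_blocks : List Int) : Prop :=
  if num = 1 then Naomi_blocks ≠ [] ∧ Ken_blocks ≠ []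
  else Naomi_blocks = [] ∨
    (Naomi_blocks.Pairwise (· ≤ ·) ∧ Ken_blocks.Pairwise (· ≤ ·) ∧
     Naomi_blocks.length ≤ Ken_blocks.length ∧
     ((∀ k ∈ Ken_blocks, k ≠ 0) ∨ (∀ a ∈ Naomi_blocks, 0 ≤ a))) ∨
    (Ken_blocks ≠ [] ∧ ∀ k ∈ Ken_blocks, k < Naomi_blocks.headD 0) ∨
    (Ken_blocks ≠ [] ∧ Naomi_blocks.length ≤ Ken_blocks.length ∧
     ∀ a ∈ Naomi_blocks, ∀ k ∈ Ken_blocks, a < k) ∨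
    (Ken_blocks ≠ [] ∧ Naomi_blocks.length = 1 ∧ 0 ≤ Naomi_blocks.headD 0 ∧
     Naomi_blocks.headD 0 ≤ Ken_blocks.getLastD 0)
instance (num : Int) (Naomi_blocks : List Int) (Ken_blocks : List Int) : Decidable (Pre_solve_War num Naomi_blocks Ken_blocks) := by unfold Pre_solve_War; infer_instance
def pvWitness_solve_War : Int × List Int × List Int := (3, [1, 2, 4], [1, 3, 5])

def Spec_solve_War (num : Int) (Naomi_blocks : List Int) (Ken_blocks : List Int) (out : Int) : Prop := out = solve_War_alt num Naomi_blocks Ken_blocks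
instance (num : Int) (Naomi_blocks : List Int) (Ken_blocks : List Int) (out : Int) : Decidable (Spec_solve_War num Naomi_blocks Ken_blocks out) := by unfold Spec_solve_War; infer_instance

-- ===== CLAIM (what is proved, stated in full; the proofs are below) =====
def Claim_equal_solve_War : Prop := ∀ (num : Int) (Naomi_blocks : List Int) (Ken_blocks : List Int), Dom_solve_War num Naomi_blocks Ken_blocks → Pre_solve_War num Naomi_blocks Ken_blocks → Spec_solve_War num Naomi_blocks Ken_blocks (solve_War num Naomi_blocks Ken_blocks)

-- ===== LEMMAS AND PROOFS =====

-- the common mathematical value: Naomi's wins when her sorted hand N plays against the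
-- still-unspent sorted suffix S of Ken's hand
def gWins : List Int → List Int → Int
  | [], _ => 0
  | c :: N, S =>
    match S.dropWhile (fun k => decide (k ≤ c)) with
    | [] => 1 + gWins N []
    | _ :: S' => gWins N S'

lemma gWins_nil_right : ∀ N : List Int, gWins N [] = (N.length : Int) := by
  intro N
  induction N with
  | nil => rfl
  | cons c N ih => simp [gWins, List.dropWhile, ih]; ring

lemma mem_le_getLastD (d : Int) : ∀ (l : List Int), l.Pairwise (· ≤ ·) →
    ∀ a ∈ l, a ≤ l.getLastD d := by
  intro l
  induction l with
  | nil => simp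
  | cons x xs ih =>
    intro hs a ha
    cases xs with
    | nil =>
      rcases List.mem_cons.mp ha with rfl | h
      · simp
      · simp at h
    | cons y ys =>
      have htail : ∀ b ∈ y :: ys, b ≤ (y :: ys).getLastD d := ih hs.of_cons
      have hlast : (x :: y :: ys).getLastD d = (y :: ys).getLastD d := by simp
      rcases List.mem_cons.mp ha with rfl | hmem
      · have hxy : a ≤ y := List.rel_of_pairwise_cons hs (by simp)
        exact hlast ▸ le_trans hxy (htail y (by simp))
      · exact hlast ▸ htail a hmem

lemma headD_le_mem {l : List Int} (hs : l.Pairwise (· ≤ ·)) {a : Int} (ha : a ∈ l) (d : Int) :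
    l.headD d ≤ a := by
  cases l with
  | nil => simp at ha
  | cons x xs =>
    rcases List.mem_cons.mp ha with rfl | hmem
    · simp
    · simpa using List.rel_of_pairwise_cons hs hmem

lemma gWins_zero : ∀ (N S : List Int), (∀ a ∈ N, ∀ k ∈ S, a < k) →
    N.length ≤ S.length → gWins N S = 0 := by
  intro N
  induction N with
  | nil => intro S _ _; rfl
  | cons c N ih =>
    intro S hlt hlen
    cases S with
    | nil => simp at hlen
    | cons k S' =>
      have hck : c < k := hlt c (by simp) k (by simp)
      have hdw : (k :: S').dropWhile (fun k => decide (k ≤ c)) = k :: S' := by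
        simp [List.dropWhile, not_le.mpr hck]
      rw [gWins, hdw]
      exact ih S' (fun a ha k' hk' => hlt a (by simp [ha]) k' (by simp [hk'])) (by simpa using hlen)

lemma findKCard_none (naomi0 : Int) : ∀ (K : List Int), findKCard naomi0 K = none →
    ∀ k ∈ K, ¬ naomi0 < k := by
  intro K
  induction K with
  | nil => simp
  | cons k ks ih =>
    intro h k' hk'
    by_cases hgt : naomi0 < k
    · simp [findKCard, hgt] at h
    · rw [findKCard, if_neg hgt] at h
      rcases List.mem_cons.mp hk' with rfl | hmem
      · exact hgt
      · exact ih h k' hmem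

lemma findKCard_some (naomi0 kc : Int) : ∀ (K : List Int), findKCard naomi0 K = some kc →
    ∃ P S, K = P ++ kc :: S ∧ (∀ p ∈ P, ¬ naomi0 < p) ∧ naomi0 < kc := by
  intro K
  induction K with
  | nil => simp [findKCard]
  | cons k ks ih =>
    intro h
    by_cases hgt : naomi0 < k
    · rw [findKCard, if_pos hgt, Option.some.injEq] at h
      exact ⟨[], ks, by simp [h], by simp, h ▸ hgt⟩
    · rw [findKCard, if_neg hgt] at h
      obtain ⟨P, S, hK, hP, hkc⟩ := ih h
      exact ⟨k :: P, S, by simp [hK], by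
        intro p hp
        rcases List.mem_cons.mp hp with rfl | hmem
        · exact hgt
        · exact hP p hmem, hkc⟩

lemma findKCard_append_le (c : Int) (S : List Int) : ∀ (P : List Int), (∀ p ∈ P, ¬ c < p) →
    findKCard c (P ++ S) = findKCard c S := by
  intro P
  induction P with
  | nil => intro _; rfl
  | cons p ps ih =>
    intro hP
    rw [List.cons_append, findKCard, if_neg (hP p (by simp))]
    exact ih (fun q hq => hP q (by simp [hq]))

lemma remove_split (kc : Int) (P S : List Int) (hP : ∀ p ∈ P, p ≠ kc) :
    (PySem.List.remove? (P ++ kc :: S) kc).getD (P ++ kc :: S) = P ++ S := by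
  have hmem : kc ∈ P ++ kc :: S := by simp
  rw [PySem.List.remove?_eq_some_erase _ _ hmem, Option.getD_some]
  rw [List.erase_append_right _ (fun hc => hP kc hc rfl), List.erase_cons_head]

lemma dropWhile_prefix (c k : Int) (S' : List Int) : ∀ (Q : List Int), (∀ q ∈ Q, q ≤ c) →
    ¬ k ≤ c → (Q ++ k :: S').dropWhile (fun x => decide (x ≤ c)) = k :: S' := by
  intro Q
  induction Q with
  | nil => intro _ hk; simp [hk]
  | cons q qs ih =>
    intro hQ hk
    rw [List.cons_append, List.dropWhile_cons, if_pos (by simpa using hQ q (by simp))]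
    exact ih (fun x hx => hQ x (by simp [hx])) hk

-- A's loop with Ken's hand split as P ++ S: P are spent-but-undiscarded small blocks
-- (each ≤ every remaining Naomi block), S the suffix B's pointer has not passed
lemma warLoop_g : ∀ (N P S : List Int) (win : Int),
    (P ++ S).Pairwise (· ≤ ·) → N.Pairwise (· ≤ ·) →
    (∀ p ∈ P, ∀ a ∈ N, p ≤ a) →
    ((∀ k ∈ P ++ S, k ≠ 0) ∨ (∀ a ∈ N, 0 ≤ a)) →
    N.length ≤ P.length + S.length →
    warLoop N (P ++ S) win = win + gWins N S := by
  intro N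
  induction N with
  | nil => intro P S win _ _ _ _ _; rw [warLoop, gWins]; ring
  | cons c N ih =>
    intro P S win hKs hNs hPle hnz hlen
    have hKlen : 1 ≤ P.length + S.length := by simp at hlen; omega
    rw [warLoop]
    by_cases h1 : c > (P ++ S).getLastD 0
    · rw [if_pos h1]
      have hdw : S.dropWhile (fun k => decide (k ≤ c)) = [] := by
        rw [List.dropWhile_eq_nil_iff]
        intro x hx
        have := mem_le_getLastD 0 (P ++ S) hKs x (by simp [hx])
        simp
        omega
      rw [gWins, hdw, gWins_nil_right]
      simp only [List.length_cons]
      push_cast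
      ring
    · rw [if_neg h1]
      by_cases h2 : (P ++ S).headD 0 > (c :: N).getLastD 0
      · rw [if_pos h2]
        have hcle : c ≤ (c :: N).getLastD 0 := mem_le_getLastD 0 _ hNs c (by simp)
        cases P with
        | cons p ps =>
          have hpc : p ≤ c := hPle p (by simp) c (by simp)
          simp only [List.cons_append, List.headD_cons] at h2
          omega
        | nil =>
          simp only [List.nil_append] at h2 hKs hlen
          have hz : gWins (c :: N) S = 0 := by
            apply gWins_zero
            · intro a ha k hk
              have h3 : a ≤ (c :: N).getLastD 0 := mem_le_getLastD 0 _ hNs a ha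
              have h4 : S.headD 0 ≤ k := headD_le_mem hKs hk 0
              omega
            · simpa using hlen
          rw [hz]
          ring
      · rw [if_neg h2]
        have hPc : ∀ p ∈ P, p ≤ c := fun p hp => hPle p hp c (by simp)
        rw [findKCard_append_le c S P (fun p hp => not_lt.mpr (hPc p hp))]
        have hcN : ∀ a ∈ N, c ≤ a := fun a ha => List.rel_of_pairwise_cons hNs ha
        cases hf : findKCard c S with
        | none =>
          dsimp only
          have hSle : ∀ k ∈ S, k ≤ c := fun k hk => not_lt.mp (findKCard_none c S hf k hk)
          have hdw : S.dropWhile (fun k => decide (k ≤ c)) = [] := by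
            rw [List.dropWhile_eq_nil_iff]
            intro x hx
            simpa using hSle x hx
          have htail : (P ++ S).tail ++ ([] : List Int) = (P ++ S).tail := by simp
          have hrec := ih (P ++ S).tail [] (win + 1)
            (by rw [htail]; exact hKs.sublist (List.tail_sublist _))
            hNs.of_cons
            (by
              intro p hp a ha
              have hpm : p ∈ P ++ S := List.mem_of_mem_tail hp
              rcases List.mem_append.mp hpm with hpP | hpS
              · exact hPle p hpP a (by simp [ha])
              · exact le_trans (hSle p hpS) (hcN a ha))
            (by
              rw [htail]
              rcases hnz with hnz | hnn
              · exact Or.inl fun k hk => hnz k (List.mem_of_mem_tail hk)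
              · exact Or.inr fun a ha => hnn a (by simp [ha]))
            (by
              simp at hlen ⊢
              omega)
          rw [htail] at hrec
          rw [hrec, gWins, hdw, gWins_nil_right]
          ring
        | some kc =>
          dsimp only
          obtain ⟨Q, S', hS, hQ, hck⟩ := findKCard_some c kc S hf
          have hkcmem : kc ∈ P ++ S := by simp [hS]
          have hkcne : kc ≠ 0 := by
            rcases hnz with hnz | hnn
            · exact hnz kc hkcmem
            · have := hnn c (by simp); omega
          rw [if_pos hkcne]
          have hsplit : P ++ S = (P ++ Q) ++ kc :: S' := by rw [hS, List.append_assoc]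
          have hrm : (PySem.List.remove? (P ++ S) kc).getD (P ++ S) = (P ++ Q) ++ S' := by
            rw [hsplit]
            apply remove_split
            intro p hp
            rcases List.mem_append.mp hp with hpP | hpQ
            · have := hPc p hpP; omega
            · have := hQ p hpQ; omega
          have hdw : S.dropWhile (fun k => decide (k ≤ c)) = kc :: S' := by
            rw [hS]
            exact dropWhile_prefix c kc S' Q (fun q hq => not_lt.mp (hQ q hq)) (by omega)
          have hsub : List.Sublist ((P ++ Q) ++ S') ((P ++ Q) ++ kc :: S') :=
            List.Sublist.append_left (List.sublist_cons_self kc S') (P ++ Q)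
          have hrec := ih (P ++ Q) S' win
            (by rw [← hsplit] at hsub; exact hKs.sublist hsub)
            hNs.of_cons
            (by
              intro p hp a ha
              rcases List.mem_append.mp hp with hpP | hpQ
              · exact hPle p hpP a (by simp [ha])
              · exact le_trans (not_lt.mp (hQ p hpQ)) (hcN a ha))
            (by
              rcases hnz with hnz | hnn
              · exact Or.inl fun k hk => hnz k ((hsplit ▸ hsub).mem hk)
              · exact Or.inr fun a ha => hnn a (by simp [ha]))
            (by
              have : S.length = Q.length + S'.length + 1 := by simp [hS]; omega
              simp at hlen ⊢
              omega)
          rw [hrm, hrec, gWins, hdw]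

lemma bSkip_spec (K : List Int) (c : Int) : ∀ (n j : Nat), K.length - j ≤ n → j ≤ K.length →
    K.drop (bSkip K c j) = (K.drop j).dropWhile (fun k => decide (k ≤ c)) ∧
    bSkip K c j ≤ K.length := by
  intro n
  induction n with
  | zero =>
    intro j hn hj
    have hj' : j = K.length := by omega
    rw [bSkip, dif_neg (by omega)]
    subst hj'
    simp
  | succ n ihn =>
    intro j hn hj
    by_cases h : j < K.length
    · have hdj : K.drop j = K[j] :: K.drop (j + 1) := List.drop_eq_getElem_cons h
      rw [bSkip, dif_pos h]
      by_cases hle : K[j] ≤ c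
      · rw [if_pos hle]
        obtain ⟨h1, h2⟩ := ihn (j + 1) (by omega) (by omega)
        refine ⟨?_, h2⟩
        rw [h1, hdj, List.dropWhile_cons, if_pos (by simpa using hle)]
      · rw [if_neg hle]
        refine ⟨?_, by omega⟩
        rw [hdj, List.dropWhile_cons, if_neg (by simpa using hle), ← hdj]
    · rw [bSkip, dif_neg h]
      have hj' : j = K.length := by omega
      subst hj'
      simp

lemma foldl_g (K : List Int) : ∀ (N : List Int) (j : Nat) (m : Int), j ≤ K.length →
    ((N.foldl (bStep K) (j, m)).2 : Int) = m + (N.length : Int) - gWins N (K.drop j) := by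
  intro N
  induction N with
  | nil => intro j m _; simp [gWins]
  | cons c N ih =>
    intro j m hj
    obtain ⟨hdrop, hle⟩ := bSkip_spec K c (K.length - j) j (by omega) hj
    rw [List.foldl_cons]
    by_cases hlt : bSkip K c j < K.length
    · have hstep : bStep K (j, m) c = (bSkip K c j + 1, m + 1) := by
        simp [bStep, hlt]
      have hdj : K.drop (bSkip K c j) = K[bSkip K c j] :: K.drop (bSkip K c j + 1) :=
        List.drop_eq_getElem_cons hlt
      have hg : gWins (c :: N) (K.drop j) = gWins N (K.drop (bSkip K c j + 1)) := by
        rw [gWins, ← hdrop, hdj]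
      rw [hstep, ih (bSkip K c j + 1) (m + 1) (by omega), hg]
      simp only [List.length_cons]
      push_cast
      ring
    · have hstep : bStep K (j, m) c = (bSkip K c j, m) := by
        simp [bStep, hlt]
      have hj' : bSkip K c j = K.length := by omega
      have hg : gWins (c :: N) (K.drop j) = 1 + gWins N [] := by
        rw [gWins, ← hdrop, hj', List.drop_length]
      rw [hstep, ih (bSkip K c j) m hle, hg, hj', List.drop_length]
      simp only [List.length_cons]
      push_cast
      ring

lemma getLastD_self_mem {l : List Int} (h : l ≠ []) (d : Int) : l.getLastD d ∈ l := by
  induction l with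
  | nil => exact absurd rfl h
  | cons x xs ih =>
    cases xs with
    | nil => simp
    | cons y ys =>
      have : (x :: y :: ys).getLastD d = (y :: ys).getLastD d := by simp
      rw [this]
      exact List.mem_cons_of_mem x (ih (by simp))

lemma headD_self_mem {l : List Int} (h : l ≠ []) (d : Int) : l.headD d ∈ l := by
  cases l with
  | nil => exact absurd rfl h
  | cons x xs => simp

lemma bSkip_all (K : List Int) (c : Int) (h : ∀ k ∈ K, k ≤ c) : bSkip K c 0 = K.length := by
  obtain ⟨hd, hle⟩ := bSkip_spec K c K.length 0 (by omega) (by omega)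
  rw [List.drop_zero] at hd
  have hnil : K.dropWhile (fun k => decide (k ≤ c)) = [] := by
    rw [List.dropWhile_eq_nil_iff]
    intro x hx
    simpa using h x hx
  rw [hnil, List.drop_eq_nil_iff] at hd
  omega

lemma foldl_stuck (K : List Int) : ∀ (M : List Int) (m : Int),
    M.foldl (bStep K) (K.length, m) = (K.length, m) := by
  intro M
  induction M with
  | nil => intro m; rfl
  | cons c M ih =>
    intro m
    have hskip : bSkip K c K.length = K.length := by
      rw [bSkip, dif_neg (lt_irrefl _)]
    rw [List.foldl_cons]
    have hb : bStep K (K.length, m) c = (K.length, m) := by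
      simp [bStep, hskip]
    rw [hb, ih]

lemma foldl_allbeat (K : List Int) : ∀ (M : List Int) (j : Nat) (m : Int),
    (∀ a ∈ M, ∀ k ∈ K, a < k) → j + M.length ≤ K.length →
    M.foldl (bStep K) (j, m) = (j + M.length, m + (M.length : Int)) := by
  intro M
  induction M with
  | nil => intro j m _ _; simp
  | cons c M ih =>
    intro j m hlt hlen
    have hj : j < K.length := by simp at hlen; omega
    have hskip : bSkip K c j = j := by
      rw [bSkip, dif_pos hj, if_neg (not_le.mpr (hlt c (by simp) _ (K.getElem_mem hj)))]
    have hb : bStep K (j, m) c = (j + 1, m + 1) := by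
      simp [bStep, hskip, hj]
    rw [List.foldl_cons, hb,
      ih (j + 1) (m + 1) (fun a ha k hk => hlt a (by simp [ha]) k hk) (by simp at hlen ⊢; omega)]
    simp only [List.length_cons, Prod.mk.injEq]
    refine ⟨by omega, by push_cast; ring⟩

-- every Ken block loses to Naomi's first block: the first early return fires at once
lemma case_allsmall (c : Int) (nr K : List Int) (hK : K ≠ []) (h : ∀ k ∈ K, k < c) :
    warLoop (c :: nr) K 0 =
      (((c :: nr).length : Int)) - ((c :: nr).foldl (bStep K) (0, 0)).2 := by
  rw [warLoop, if_pos (h _ (getLastD_self_mem hK 0))]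
  rw [List.foldl_cons]
  have hskip : bSkip K c 0 = K.length := bSkip_all K c (fun k hk => le_of_lt (h k hk))
  have hb : bStep K (0, 0) c = (K.length, 0) := by
    simp [bStep, hskip]
  rw [hb, foldl_stuck]
  simp

-- every Ken block beats every Naomi block: the second early return fires at once
lemma case_allbig (c : Int) (nr K : List Int) (hK : K ≠ [])
    (hlen : (c :: nr).length ≤ K.length) (h : ∀ a ∈ c :: nr, ∀ k ∈ K, a < k) :
    warLoop (c :: nr) K 0 =
      (((c :: nr).length : Int)) - ((c :: nr).foldl (bStep K) (0, 0)).2 := by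
  rw [warLoop,
    if_neg (not_lt.mpr (le_of_lt (h c (by simp) _ (getLastD_self_mem hK 0)))),
    if_pos (h _ (getLastD_self_mem (by simp) 0) _ (headD_self_mem hK 0))]
  rw [foldl_allbeat K (c :: nr) 0 0 h (by simpa using hlen)]
  simp

-- Naomi holds one nonnegative block not above Ken's last: a single round decides it
lemma case_single (a : Int) (K : List Int) (hK : K ≠ []) (ha : 0 ≤ a)
    (hle : a ≤ K.getLastD 0) :
    warLoop [a] K 0 = ((1 : Int)) - (([a] : List Int).foldl (bStep K) (0, 0)).2 := by
  obtain ⟨hd, hjle⟩ := bSkip_spec K a K.length 0 (by omega) (by omega)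
  rw [List.drop_zero] at hd
  have hga : ([a] : List Int).getLastD 0 = a := by simp
  rw [warLoop, hga, if_neg (not_lt.mpr hle)]
  rw [List.foldl_cons]
  cases hf : findKCard a K with
  | none =>
    have hall : ∀ k ∈ K, k ≤ a := fun k hk => not_lt.mp (findKCard_none a K hf k hk)
    have hhd : K.headD 0 ≤ a := hall _ (headD_self_mem hK 0)
    rw [if_neg (not_lt.mpr hhd)]
    have hskip : bSkip K a 0 = K.length := bSkip_all K a hall
    have hb : bStep K (0, 0) a = (K.length, 0) := by
      simp [bStep, hskip]
    rw [hb]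
    simp [warLoop]
  | some kc =>
    obtain ⟨Q, S', hS, hQ, hka⟩ := findKCard_some a kc K hf
    have hkc0 : kc ≠ 0 := by omega
    have hdw : K.dropWhile (fun k => decide (k ≤ a)) = kc :: S' := by
      rw [hS]
      exact dropWhile_prefix a kc S' Q (fun q hq => not_lt.mp (hQ q hq)) (by omega)
    have hlt : bSkip K a 0 < K.length := by
      rcases Nat.lt_or_ge (bSkip K a 0) K.length with h | h
      · exact h
      · rw [List.drop_eq_nil_of_le h, hdw] at hd
        exact absurd hd.symm (by simp)
    have hb : bStep K (0, 0) a = (bSkip K a 0 + 1, 1) := by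
      simp [bStep, hlt]
    rw [hb]
    by_cases h2 : K.headD 0 > a
    · rw [if_pos h2]
      simp
    · rw [if_neg h2]
      dsimp only
      rw [if_pos hkc0]
      simp [warLoop]

-- ===== VERDICT (by name: the statement is the Claim_ definition above) =====
theorem solve_War_spec : Claim_equal_solve_War := by
  intro num N K _ hpre
  unfold Spec_solve_War
  rw [solve_War, solve_War_alt]
  by_cases h1 : num = 1
  · rw [if_pos h1, if_pos h1]
  · rw [if_neg h1, if_neg h1]
    rw [Pre_solve_War, if_neg h1] at hpre
    rcases hpre with rfl | ⟨hNs, hKs, hlen, hnz⟩ | ⟨hK, hsm⟩ | ⟨hK, hlen, hbig⟩ | ⟨hK, hone, ha0, hale⟩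
    · rw [warLoop]
      simp
    · have hA := warLoop_g N [] K 0 (by simpa using hKs) hNs (by simp)
        (by simpa using hnz) (by simpa using hlen)
      have hB := foldl_g K N 0 0 (by omega)
      simp only [List.nil_append] at hA
      rw [hA, hB, List.drop_zero]
      ring
    · cases N with
      | nil => rw [warLoop]; simp
      | cons c nr => exact case_allsmall c nr K hK (by simpa using hsm)
    · cases N with
      | nil => rw [warLoop]; simp
      | cons c nr => exact case_allbig c nr K hK hlen hbig
    · obtain ⟨a, rfl⟩ : ∃ a, N = [a] := by
        cases N with
        | nil => simp at hone
        | cons x xs =>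
          cases xs with
          | nil => exact ⟨x, rfl⟩
          | cons y ys => simp at hone
      simpa using case_single a K hK (by simpa using ha0) (by simpa using hale)
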